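-- pv_equiv track=rewrite | github.com/BrandonW-ERAU/vacation | main.py | best_combo_of_hotels
-- ===== SOURCE A (Python) =====
-- HOTEL_BUDGET = 850
--
-- hotel_rates = {
--     "Motel 6": 89,
--     "Best Western": 109,
--     "Holiday Inn Express": 115,
--     "Courtyard by Marriott": 229,
--     "Residence Inn": 199,
--     "Hampton Inn": 209
-- }
--
-- def cost_of_hotel_combo(hotel_combo):
--     """Finds the total cost of a combination of hotels from the hotel_rates dictionary"""
--     total_cost = 0
--     for hotel in hotel_combo:
--         total_cost += hotel_rates[hotel]
--     return total_cost
--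
-- def best_combo_of_hotels(all_hotel_combos):
--     """Finds the combination of hotels that when their rates are added is closest to the hotel budget"""
--     total_cost = 0
--     best_combo = None
--     for hotel_combo in all_hotel_combos:
--         total_hotel_cost = cost_of_hotel_combo(hotel_combo)
--         if total_cost < total_hotel_cost <= HOTEL_BUDGET:
--             total_cost = total_hotel_cost
--             best_combo = hotel_combo
--     return best_combo, total_cost
-- ===== SOURCE B (Python) =====
-- HOTEL_BUDGET = 850
--
-- hotel_rates = {
--     "Motel 6": 89,
--     "Best Western": 109,
--     "Holiday Inn Express": 115,
--     "Courtyard by Marriott": 229,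
--     "Residence Inn": 199,
--     "Hampton Inn": 209
-- }
--
-- def best_combo_of_hotels(all_hotel_combos):
--     """Price every combo, sort the price list from most to least expensive
--     (a stable sort, so equally-priced combos keep their input order), and
--     return the first combo that actually costs something and fits the budget."""
--     priced = sorted(
--         ((sum(hotel_rates[h] for h in combo), combo) for combo in all_hotel_combos),
--         key=lambda p: p[0], reverse=True)
--     for cost, combo in priced:
--         if 0 < cost <= HOTEL_BUDGET:
--             return combo, cost
--     return None, 0
-- ===== Notes on version B (the rewrite author's own statement) =====
-- stated objective: alternative
-- what changed: B replaces A's single-pass running-max scan with a sort-then-select strategy: it prices every combo, stably sorts the priced list from most to least expensive, and returns the first entry whose positive cost fits the budget (stability makes the earliest of equally-priced combos win, as in any stable selection); Pre_ excludes only inputs naming a hotel absent from hotel_rates, where A raises KeyError.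
import Mathlib
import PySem

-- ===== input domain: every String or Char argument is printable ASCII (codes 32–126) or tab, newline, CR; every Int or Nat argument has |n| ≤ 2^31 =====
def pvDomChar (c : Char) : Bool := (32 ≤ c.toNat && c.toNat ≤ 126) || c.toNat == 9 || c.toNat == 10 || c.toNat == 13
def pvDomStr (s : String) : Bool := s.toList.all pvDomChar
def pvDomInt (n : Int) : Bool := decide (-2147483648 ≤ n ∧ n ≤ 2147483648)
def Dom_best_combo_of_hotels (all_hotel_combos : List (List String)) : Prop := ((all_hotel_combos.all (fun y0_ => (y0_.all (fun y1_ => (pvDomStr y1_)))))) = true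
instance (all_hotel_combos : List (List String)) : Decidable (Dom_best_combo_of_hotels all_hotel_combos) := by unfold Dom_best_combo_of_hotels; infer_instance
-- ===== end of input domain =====

-- B prices all combos, stably sorts the price list descending and takes the first one that fits the budget (objective: alternative).

-- ===== PORT A =====
def pvRates : PySem.Dict String Int :=
  PySem.Dict.ofList [("Motel 6", 89), ("Best Western", 109), ("Holiday Inn Express", 115),
    ("Courtyard by Marriott", 229), ("Residence Inn", 199), ("Hampton Inn", 209)]

-- 'hotel_rates[hotel]' raises KeyError on unknown names; those inputs are excluded by Pre_ (default 0 is never read there)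
def cost_of_hotel_combo (hotel_combo : List String) : Int :=
  hotel_combo.foldl (fun total_cost hotel => total_cost + (PySem.Dict.get? pvRates hotel).getD 0) 0

def best_combo_of_hotels (all_hotel_combos : List (List String)) : Option (List String) × Int :=
  let st := all_hotel_combos.foldl
    (fun (st : Int × Option (List String)) hotel_combo =>
      let total_hotel_cost := cost_of_hotel_combo hotel_combo
      if st.1 < total_hotel_cost ∧ total_hotel_cost ≤ 850 then (total_hotel_cost, some hotel_combo)
      else st)
    (0, none)
  (st.2, st.1)

-- ===== PORT B =====
-- cost as sum over a generator: sum(hotel_rates[h] for h in combo); KeyError excluded by Pre_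
def pvCostB (combo : List String) : Int :=
  (combo.map (fun h => (PySem.Dict.get? pvRates h).getD 0)).sum

-- the 'for cost, combo in priced: … return' loop of Source B
def pvFirstFit : List (Int × List String) → Option (List String) × Int
  | [] => (none, 0)
  | (cost, combo) :: rest =>
      if 0 < cost ∧ cost ≤ 850 then (some combo, cost) else pvFirstFit rest

def best_combo_of_hotels_alt (all_hotel_combos : List (List String)) : Option (List String) × Int :=
  pvFirstFit
    (PySem.List.sorted (all_hotel_combos.map (fun combo => (pvCostB combo, combo)))
      (fun p => p.1) true)

-- ===== PRECONDITION & SPEC =====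
-- Pre_ excludes exactly the inputs where A raises KeyError: a combo mentioning a hotel not in hotel_rates.
def Pre_best_combo_of_hotels (all_hotel_combos : List (List String)) : Prop :=
  ∀ combo ∈ all_hotel_combos, ∀ h ∈ combo,
    h ∈ (["Motel 6", "Best Western", "Holiday Inn Express",
          "Courtyard by Marriott", "Residence Inn", "Hampton Inn"] : List String)
instance (all_hotel_combos : List (List String)) : Decidable (Pre_best_combo_of_hotels all_hotel_combos) := by
  unfold Pre_best_combo_of_hotels; infer_instance
def pvWitness_best_combo_of_hotels : List (List String) := [["Motel 6", "Residence Inn"], ["Hampton Inn"]]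
def Spec_best_combo_of_hotels (all_hotel_combos : List (List String)) (out : Option (List String) × Int) : Prop := out = best_combo_of_hotels_alt all_hotel_combos
instance (all_hotel_combos : List (List String)) (out : Option (List String) × Int) : Decidable (Spec_best_combo_of_hotels all_hotel_combos out) := by unfold Spec_best_combo_of_hotels; infer_instance

-- ===== CLAIM (what is proved, stated in full; the proofs are below) =====
def Claim_equal_best_combo_of_hotels : Prop := ∀ (all_hotel_combos : List (List String)), Dom_best_combo_of_hotels all_hotel_combos → Pre_best_combo_of_hotels all_hotel_combos → Spec_best_combo_of_hotels all_hotel_combos (best_combo_of_hotels all_hotel_combos)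

-- ===== LEMMAS AND PROOFS =====

-- the two cost computations agree (loop-with-accumulator vs sum of map)
lemma cost_eq_costB (combo : List String) : cost_of_hotel_combo combo = pvCostB combo := by
  rw [pvCostB, List.sum_eq_foldl, List.foldl_map]
  rfl

-- A's loop step, on a priced pair
def pvStepA (st : Int × Option (List String)) (p : Int × List String) : Int × Option (List String) :=
  if st.1 < p.1 ∧ p.1 ≤ 850 then (p.1, some p.2) else st

-- A-state view of B's loop result
def pvToSt (r : Option (List String) × Int) : Int × Option (List String) := (r.2, r.1)

-- the cost pvFirstFit reports is 0 or the cost of a qualifying member of the list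
lemma firstFit_cost (l : List (Int × List String)) :
    (pvFirstFit l).2 = 0 ∨ ∃ p ∈ l, (pvFirstFit l).2 = p.1 ∧ 0 < p.1 ∧ p.1 ≤ 850 := by
  induction l with
  | nil => left; rfl
  | cons x t ih =>
    obtain ⟨c, combo⟩ := x
    rw [pvFirstFit]
    split_ifs with h
    · right; exact ⟨(c, combo), List.mem_cons_self, rfl, h⟩
    · rcases ih with h0 | ⟨p, hp, he⟩
      · left; exact h0
      · right; exact ⟨p, List.mem_cons_of_mem _ hp, he⟩

-- core step lemma: on a descending-sorted accumulator, running A's step equals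
-- inserting the pair (stably) and re-reading the first fit
lemma step_insert (x : Int × List String) (acc : List (Int × List String))
    (hs : acc.Pairwise (fun a b => b.1 ≤ a.1)) :
    pvStepA (pvToSt (pvFirstFit acc)) x =
      pvToSt (pvFirstFit (PySem.List.insertBy (fun a b => decide (b.1 < a.1)) x acc)) := by
  induction acc with
  | nil =>
    obtain ⟨c, combo⟩ := x
    simp only [pvFirstFit, pvToSt, pvStepA, PySem.List.insertBy]
    split_ifs <;> rfl
  | cons y ys ih =>
    obtain ⟨c, combo⟩ := x
    obtain ⟨cy, cb⟩ := y
    rw [List.pairwise_cons] at hs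
    rw [PySem.List.insertBy]
    by_cases h1 : cy < c
    · simp only [h1, decide_true, if_true]
      by_cases hq : 0 < c ∧ c ≤ 850
      · have hR : pvFirstFit ((c, combo) :: (cy, cb) :: ys) = (some combo, c) := by
          rw [pvFirstFit, if_pos hq]
        rw [hR]
        simp only [pvStepA, pvToSt]
        rcases firstFit_cost ((cy, cb) :: ys) with h0 | ⟨p, hp, he, hq'⟩
        · rw [h0, if_pos (by constructor <;> omega)]
        · have hle : p.1 ≤ cy := by
            rcases List.mem_cons.mp hp with h | h
            · rw [h]
            · exact hs.1 p h
          rw [he, if_pos (by constructor <;> omega)]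
      · have hR : pvFirstFit ((c, combo) :: (cy, cb) :: ys) = pvFirstFit ((cy, cb) :: ys) := by
          rw [pvFirstFit, if_neg hq]
        rw [hR]
        simp only [pvStepA, pvToSt]
        rw [if_neg]
        rcases firstFit_cost ((cy, cb) :: ys) with h0 | ⟨p, hp, he, hq'⟩
        · rw [h0]; omega
        · rw [he]; omega
    · simp only [h1, decide_false, Bool.false_eq_true, if_false]
      by_cases hq : 0 < cy ∧ cy ≤ 850
      · have hL : pvFirstFit ((cy, cb) :: ys) = (some cb, cy) := by
          rw [pvFirstFit, if_pos hq]
        have hR : pvFirstFit ((cy, cb) ::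
            PySem.List.insertBy (fun a b => decide (b.1 < a.1)) (c, combo) ys) = (some cb, cy) := by
          rw [pvFirstFit, if_pos hq]
        rw [hL, hR]
        simp only [pvStepA, pvToSt]
        rw [if_neg (by omega)]
      · have hL : pvFirstFit ((cy, cb) :: ys) = pvFirstFit ys := by
          rw [pvFirstFit, if_neg hq]
        have hR : pvFirstFit ((cy, cb) ::
            PySem.List.insertBy (fun a b => decide (b.1 < a.1)) (c, combo) ys) =
            pvFirstFit (PySem.List.insertBy (fun a b => decide (b.1 < a.1)) (c, combo) ys) := by
          rw [pvFirstFit, if_neg hq]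
        rw [hL, hR]
        exact ih hs.2

-- sortedRev of one more element is an insertBy into the previous sortedRev
lemma sortedRev_append_singleton (l : List (Int × List String)) (x : Int × List String) :
    PySem.List.sorted (l ++ [x]) (fun p => p.1) true =
      PySem.List.insertBy (fun a b => decide (b.1 < a.1)) x
        (PySem.List.sorted l (fun p => p.1) true) := by
  rw [PySem.List.sorted_rev_eq_foldl_insertBy, PySem.List.sorted_rev_eq_foldl_insertBy,
    List.foldl_append]
  rfl

-- main invariant: folding A's step over the remaining pairs, starting from the
-- first fit of the sorted prefix, lands on the first fit of the whole sorted list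
lemma main_inv (l : List (Int × List String)) : ∀ (p : List (Int × List String)),
    l.foldl pvStepA (pvToSt (pvFirstFit (PySem.List.sorted p (fun q => q.1) true))) =
      pvToSt (pvFirstFit (PySem.List.sorted (p ++ l) (fun q => q.1) true)) := by
  induction l with
  | nil => intro p; rw [List.append_nil]; rfl
  | cons x t ih =>
    intro p
    rw [List.foldl_cons,
      step_insert x _ (PySem.List.sorted_pairwise_rev p (fun q => q.1)),
      ← sortedRev_append_singleton, ih (p ++ [x]), List.append_assoc]
    rfl

-- ===== VERDICT (by name: the statement is the Claim_ definition above) =====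
theorem best_combo_of_hotels_spec : Claim_equal_best_combo_of_hotels := by
  intro xs _ _
  unfold Spec_best_combo_of_hotels best_combo_of_hotels best_combo_of_hotels_alt
  have hA : xs.foldl
      (fun (st : Int × Option (List String)) hotel_combo =>
        let total_hotel_cost := cost_of_hotel_combo hotel_combo
        if st.1 < total_hotel_cost ∧ total_hotel_cost ≤ 850 then (total_hotel_cost, some hotel_combo)
        else st) (0, none)
      = (xs.map (fun combo => (pvCostB combo, combo))).foldl pvStepA (0, none) := by
    rw [List.foldl_map]
    congr 1
    funext st combo
    simp only [pvStepA, cost_eq_costB]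
  rw [hA]
  have h := main_inv (xs.map (fun combo => (pvCostB combo, combo))) []
  simp only [List.nil_append] at h
  have h0 : pvToSt (pvFirstFit (PySem.List.sorted ([] : List (Int × List String)) (fun q => q.1) true)) = (0, none) := rfl
  rw [h0] at h
  rw [h]
  rfl
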